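-- pv_equiv track=rewrite | github.com/arntj/advent-of-code-2017 | 2018/17/helpers.py | find_min_max_values
-- ===== SOURCE A (Python) =====
-- def find_min_max_values(lines:list):
--   min_x = None
--   min_y = None
--   max_x = None
--   max_y = None
--
--   # find max/min values
--   for line in lines:
--     ((left_symbol, left_value), (right_symbol, right_start, right_end)) = line
--
--     if left_symbol == "x" and (min_x == None or min_x > left_value):
--       min_x = left_value
--     if left_symbol == "x" and (max_x == None or max_x < left_value):
--       max_x = left_value
--     if left_symbol == "y" and (min_y == None or min_y > left_value):
--       min_y = left_value
--     if left_symbol == "y" and (max_y == None or max_y < left_value):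
--       max_y = left_value
--
--     if right_symbol == "x" and (min_x == None or min_x > right_start):
--       min_x = right_start
--     if right_symbol == "x" and (max_x == None or max_x < right_end):
--       max_x = right_end
--     if right_symbol == "y" and (min_y == None or min_y > right_start):
--       min_y = right_start
--     if right_symbol == "y" and (max_y == None or max_y < right_end):
--       max_y = right_end
--
--   return ((min_x, min_y), (max_x, max_y))
-- ===== SOURCE B (Python) =====
-- def find_min_max_values(lines: list):
--   # collect-then-reduce: build candidate pools per axis, then take min/max once
--   x_min = [v for (s, v), _ in lines if s == "x"] + [a for _, (s, a, _) in lines if s == "x"]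
--   x_max = [v for (s, v), _ in lines if s == "x"] + [b for _, (s, _, b) in lines if s == "x"]
--   y_min = [v for (s, v), _ in lines if s == "y"] + [a for _, (s, a, _) in lines if s == "y"]
--   y_max = [v for (s, v), _ in lines if s == "y"] + [b for _, (s, _, b) in lines if s == "y"]
--   return ((min(x_min) if x_min else None, min(y_min) if y_min else None),
--           (max(x_max) if x_max else None, max(y_max) if y_max else None))
-- ===== Notes on version B (the rewrite author's own statement) =====
-- stated objective: simpler
-- what changed: Replaced A's sixteen inline sentinel-comparison branches over four running Optional accumulators with a collect-then-reduce decomposition: comprehensions gather each axis's candidate values into pools, then min/max (guarded for emptiness) reduce each pool once.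
import Mathlib
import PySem

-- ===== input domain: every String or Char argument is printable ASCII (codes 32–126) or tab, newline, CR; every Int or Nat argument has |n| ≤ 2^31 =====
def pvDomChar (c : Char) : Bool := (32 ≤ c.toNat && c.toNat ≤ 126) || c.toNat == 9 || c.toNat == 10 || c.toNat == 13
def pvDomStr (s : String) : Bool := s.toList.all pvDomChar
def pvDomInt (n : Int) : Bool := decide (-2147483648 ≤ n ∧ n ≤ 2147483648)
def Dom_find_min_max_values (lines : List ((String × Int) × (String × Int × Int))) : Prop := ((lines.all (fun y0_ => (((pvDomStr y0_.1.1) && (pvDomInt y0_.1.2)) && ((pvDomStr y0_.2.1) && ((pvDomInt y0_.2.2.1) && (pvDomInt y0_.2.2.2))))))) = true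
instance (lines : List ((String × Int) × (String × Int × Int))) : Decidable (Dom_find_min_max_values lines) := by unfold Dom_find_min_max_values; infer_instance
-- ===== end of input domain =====

-- B replaces A's sixteen inline sentinel comparisons over four running Optional accumulators
-- with a collect-then-reduce decomposition (build candidate pools, then one min/max per pool);
-- same O(n) cost, objective: simpler.

-- ===== PORT A =====
-- 'min_x == None or min_x > v' of A's guards
def pvNoneOrGt (o : Option Int) (c : Int) : Bool :=
  match o with | none => true | some m => decide (c < m)

-- 'max_x == None or max_x < v' of A's guards
def pvNoneOrLt (o : Option Int) (c : Int) : Bool :=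
  match o with | none => true | some m => decide (m < c)

-- one iteration of A's loop body, state (min_x, min_y, max_x, max_y), updates in source order
def pvStepA (st : Option Int × Option Int × Option Int × Option Int)
    (line : (String × Int) × (String × Int × Int)) :
    Option Int × Option Int × Option Int × Option Int :=
  let ls := line.1.1; let lv := line.1.2
  let rs := line.2.1; let ra := line.2.2.1; let rb := line.2.2.2
  let mx := st.1; let my := st.2.1; let mX := st.2.2.1; let mY := st.2.2.2
  let mx := if ls = "x" ∧ pvNoneOrGt mx lv then some lv else mx
  let mX := if ls = "x" ∧ pvNoneOrLt mX lv then some lv else mX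
  let my := if ls = "y" ∧ pvNoneOrGt my lv then some lv else my
  let mY := if ls = "y" ∧ pvNoneOrLt mY lv then some lv else mY
  let mx := if rs = "x" ∧ pvNoneOrGt mx ra then some ra else mx
  let mX := if rs = "x" ∧ pvNoneOrLt mX rb then some rb else mX
  let my := if rs = "y" ∧ pvNoneOrGt my ra then some ra else my
  let mY := if rs = "y" ∧ pvNoneOrLt mY rb then some rb else mY
  (mx, my, mX, mY)

def find_min_max_values (lines : List ((String × Int) × (String × Int × Int))) :
    (Option Int × Option Int) × (Option Int × Option Int) :=
  let st := lines.foldl pvStepA (none, none, none, none)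
  ((st.1, st.2.1), (st.2.2.1, st.2.2.2))

-- ===== PORT B =====
-- '[v for (s, v), _ in lines if s == sym]'
def pvLeftPool (sym : String) (lines : List ((String × Int) × (String × Int × Int))) : List Int :=
  lines.filterMap (fun l => if l.1.1 = sym then some l.1.2 else none)

-- '[a for _, (s, a, _) in lines if s == sym]'
def pvStartPool (sym : String) (lines : List ((String × Int) × (String × Int × Int))) : List Int :=
  lines.filterMap (fun l => if l.2.1 = sym then some l.2.2.1 else none)

-- '[b for _, (s, _, b) in lines if s == sym]'
def pvEndPool (sym : String) (lines : List ((String × Int) × (String × Int × Int))) : List Int :=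
  lines.filterMap (fun l => if l.2.1 = sym then some l.2.2.2 else none)

def find_min_max_values_alt (lines : List ((String × Int) × (String × Int × Int))) :
    (Option Int × Option Int) × (Option Int × Option Int) :=
  let x_min := pvLeftPool "x" lines ++ pvStartPool "x" lines
  let x_max := pvLeftPool "x" lines ++ pvEndPool "x" lines
  let y_min := pvLeftPool "y" lines ++ pvStartPool "y" lines
  let y_max := pvLeftPool "y" lines ++ pvEndPool "y" lines
  ((PySem.List.min? x_min (fun v => v), PySem.List.min? y_min (fun v => v)),
   (PySem.List.max? x_max (fun v => v), PySem.List.max? y_max (fun v => v)))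

-- ===== PRECONDITION & SPEC =====
def Spec_find_min_max_values (lines : List ((String × Int) × (String × Int × Int))) (out : (Option Int × Option Int) × (Option Int × Option Int)) : Prop := out = find_min_max_values_alt lines
instance (lines : List ((String × Int) × (String × Int × Int))) (out : (Option Int × Option Int) × (Option Int × Option Int)) : Decidable (Spec_find_min_max_values lines out) := by unfold Spec_find_min_max_values; infer_instance

-- ===== CLAIM (what is proved, stated in full; the proofs are below) =====
def Claim_equal_find_min_max_values : Prop := ∀ (lines : List ((String × Int) × (String × Int × Int))), Dom_find_min_max_values lines → Spec_find_min_max_values lines (find_min_max_values lines)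

-- ===== LEMMAS AND PROOFS =====

-- 'accumulate one candidate' in option form: pvOm f o c folds c into the running extreme o
def pvOm (f : Int → Int → Int) (o : Option Int) (c : Int) : Option Int :=
  some (match o with | none => c | some m => f m c)

-- the (at most two) candidates a line contributes to the pool for symbol `sym`,
-- right candidate selected by `rpick` (start for the min pools, end for the max pools)
def pvCands (sym : String) (rpick : Int × Int → Int)
    (l : (String × Int) × (String × Int × Int)) : List Int :=
  (if l.1.1 = sym then some l.1.2 else none).toList ++
  (if l.2.1 = sym then some (rpick l.2.2) else none).toList

lemma pv_upd_min (s sym : String) (o : Option Int) (c : Int) :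
    (if s = sym ∧ pvNoneOrGt o c then some c else o) =
      ((if s = sym then some c else none).toList).foldl (pvOm min) o := by
  by_cases h : s = sym <;> cases o <;>
    simp [pvNoneOrGt, pvOm, h, List.foldl] <;> split_ifs <;> simp [min_def] <;> omega

lemma pv_upd_max (s sym : String) (o : Option Int) (c : Int) :
    (if s = sym ∧ pvNoneOrLt o c then some c else o) =
      ((if s = sym then some c else none).toList).foldl (pvOm max) o := by
  by_cases h : s = sym <;> cases o <;>
    simp [pvNoneOrLt, pvOm, h, List.foldl] <;> split_ifs <;> simp [max_def] <;> omega

lemma pv_line_min (sym : String) (rpick : Int × Int → Int) (o : Option Int)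
    (l : (String × Int) × (String × Int × Int)) :
    (let o1 := if l.1.1 = sym ∧ pvNoneOrGt o l.1.2 then some l.1.2 else o;
     if l.2.1 = sym ∧ pvNoneOrGt o1 (rpick l.2.2) then some (rpick l.2.2) else o1) =
      (pvCands sym rpick l).foldl (pvOm min) o := by
  simp only [pvCands, List.foldl_append, ← pv_upd_min]

lemma pv_line_max (sym : String) (rpick : Int × Int → Int) (o : Option Int)
    (l : (String × Int) × (String × Int × Int)) :
    (let o1 := if l.1.1 = sym ∧ pvNoneOrLt o l.1.2 then some l.1.2 else o;
     if l.2.1 = sym ∧ pvNoneOrLt o1 (rpick l.2.2) then some (rpick l.2.2) else o1) =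
      (pvCands sym rpick l).foldl (pvOm max) o := by
  simp only [pvCands, List.foldl_append, ← pv_upd_max]

-- A's four accumulators evolve independently: the 4-tuple fold splits into four folds
lemma pv_foldA (lines : List ((String × Int) × (String × Int × Int)))
    (mx my mX mY : Option Int) :
    lines.foldl pvStepA (mx, my, mX, mY) =
      (lines.foldl (fun o l => (pvCands "x" Prod.fst l).foldl (pvOm min) o) mx,
       lines.foldl (fun o l => (pvCands "y" Prod.fst l).foldl (pvOm min) o) my,
       lines.foldl (fun o l => (pvCands "x" Prod.snd l).foldl (pvOm max) o) mX,
       lines.foldl (fun o l => (pvCands "y" Prod.snd l).foldl (pvOm max) o) mY) := by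
  induction lines generalizing mx my mX mY with
  | nil => rfl
  | cons a t ih =>
    simp only [List.foldl_cons]
    rw [show pvStepA (mx, my, mX, mY) a =
        ((pvCands "x" Prod.fst a).foldl (pvOm min) mx,
         (pvCands "y" Prod.fst a).foldl (pvOm min) my,
         (pvCands "x" Prod.snd a).foldl (pvOm max) mX,
         (pvCands "y" Prod.snd a).foldl (pvOm max) mY) from ?_]
    · exact ih _ _ _ _
    · simp only [pvStepA, ← pv_line_min, ← pv_line_max]

lemma pv_om_rc (f : Int → Int → Int) (hc : ∀ a b, f a b = f b a)
    (hrc : ∀ x a b, f (f x a) b = f (f x b) a) (o : Option Int) (a b : Int) :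
    pvOm f (pvOm f o a) b = pvOm f (pvOm f o b) a := by
  cases o <;> simp [pvOm, hc a b, hrc]

lemma pv_foldl_om_some (f : Int → Int → Int) (t : List Int) (x : Int) :
    t.foldl (pvOm f) (some x) = some (t.foldl f x) := by
  induction t generalizing x with
  | nil => rfl
  | cons c t ih => simp [List.foldl_cons, pvOm, ih]

lemma pv_min?_eq_foldl (l : List Int) :
    PySem.List.min? l (fun v => v) = l.foldl (pvOm min) none := by
  cases l with
  | nil => rfl
  | cons x t =>
    rw [PySem.List.min?_id_cons, List.foldl_cons,
      show pvOm min none x = some x from rfl, pv_foldl_om_some]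

lemma pv_max?_eq_foldl (l : List Int) :
    PySem.List.max? l (fun v => v) = l.foldl (pvOm max) none := by
  cases l with
  | nil => rfl
  | cons x t =>
    rw [PySem.List.max?_id_cons, List.foldl_cons,
      show pvOm max none x = some x from rfl, pv_foldl_om_some]

lemma pv_flatMap_perm {α β : Type} (l : List α) (f g : α → List β) :
    (l.flatMap fun x => f x ++ g x).Perm (l.flatMap f ++ l.flatMap g) := by
  induction l with
  | nil => rfl
  | cons a t ih =>
    simp only [List.flatMap_cons, List.append_assoc]
    exact List.Perm.append_left (f a)
      ((ih.append_left (g a)).trans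
        (List.perm_append_comm_assoc (g a) (t.flatMap f) (t.flatMap g)))

-- one pool, assembled: A's component fold over lines = extreme of B's concatenated pool
lemma pv_component (f : Int → Int → Int) (hc : ∀ a b, f a b = f b a)
    (hrc : ∀ x a b, f (f x a) b = f (f x b) a)
    (sym : String) (rpick : Int × Int → Int)
    (lines : List ((String × Int) × (String × Int × Int))) :
    lines.foldl (fun o l => (pvCands sym rpick l).foldl (pvOm f) o) none =
      (lines.filterMap (fun l => if l.1.1 = sym then some l.1.2 else none) ++
       lines.filterMap (fun l => if l.2.1 = sym then some (rpick l.2.2) else none)).foldl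
        (pvOm f) none := by
  rw [← List.foldl_flatMap]
  refine @List.Perm.foldl_eq _ _ (pvOm f) _ _ ⟨fun o a b => pv_om_rc f hc hrc o a b⟩ ?_ none
  rw [List.filterMap_eq_flatMap_toList, List.filterMap_eq_flatMap_toList]
  exact pv_flatMap_perm lines _ _

-- ===== VERDICT (by name: the statement is the Claim_ definition above) =====
theorem find_min_max_values_spec : Claim_equal_find_min_max_values := by
  intro lines _
  show find_min_max_values lines = find_min_max_values_alt lines
  rw [find_min_max_values, find_min_max_values_alt, pv_foldA]
  have hstart : ∀ sym, pvStartPool sym lines =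
      lines.filterMap (fun l => if l.2.1 = sym then some (Prod.fst l.2.2) else none) := by
    intro sym; rfl
  have hend : ∀ sym, pvEndPool sym lines =
      lines.filterMap (fun l => if l.2.1 = sym then some (Prod.snd l.2.2) else none) := by
    intro sym; rfl
  simp only [pvLeftPool, hstart, hend,
    pv_component min min_comm (fun x a b => inf_right_comm x a b),
    pv_component max max_comm (fun x a b => sup_right_comm x a b),
    pv_min?_eq_foldl, pv_max?_eq_foldl]
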